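-- pv_equiv track=rewrite | github.com/Abdelrahmanrezk/nlp_course_assignments | regular expression/python/regular_task.py | common_cases
-- ===== SOURCE A (Python) =====
-- def common_cases(m):
--     '''
--         This function is helful to dealing with some casses of has more spaces or taps between  words of mail
--         like abdo   @ yahoo.
--         com
--         also some cases has a ; at end of the word like .edu; others like - or "
--         other wise we git the char of th word
--         return string at end of the function
--     '''
--     ret = ''
--     spaces = ' \t\n-%'
--     for indx, c in enumerate(m):
--         if c ==' ' or c == '-' or c == '"' or c in spaces:
--             ret+=''
--         elif c == '(' or c== ')':
--             ret +=''
--         elif c == ';':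
--             ret +='.'
--         else:
--             ret +=c
--     return ret
-- ===== SOURCE B (Python) =====
-- def common_cases(m):
--     # staged whole-string passes: each special character is handled by one
--     # split/join pass over the whole string, instead of branching per character
--     for sep, rep in ((' ', ''), ('\t', ''), ('\n', ''), ('-', ''), ('%', ''),
--                      ('"', ''), ('(', ''), (')', ''), (';', '.')):
--         m = rep.join(m.split(sep))
--     return m
-- ===== Notes on version B (the rewrite author's own statement) =====
-- stated objective: alternative
-- what changed: Replaces the per-character if/elif accumulator loop with nine staged whole-string split/join passes, one per special character (rep.join(m.split(sep)), joining the semicolon pass with a dot), so no per-character branching remains.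
import Mathlib
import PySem

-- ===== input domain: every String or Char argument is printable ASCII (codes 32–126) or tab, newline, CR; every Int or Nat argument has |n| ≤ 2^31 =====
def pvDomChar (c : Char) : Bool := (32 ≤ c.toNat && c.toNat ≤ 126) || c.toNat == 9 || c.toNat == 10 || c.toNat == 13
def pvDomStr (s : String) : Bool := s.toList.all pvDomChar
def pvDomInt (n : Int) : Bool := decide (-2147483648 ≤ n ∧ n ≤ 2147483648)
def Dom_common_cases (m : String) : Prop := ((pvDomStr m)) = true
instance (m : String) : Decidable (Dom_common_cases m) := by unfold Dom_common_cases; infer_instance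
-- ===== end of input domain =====

-- B replaces A's per-character if/elif accumulator loop with nine staged whole-string split/join passes (alternative decomposition, same asymptotic cost).

-- ===== PORT A =====
-- literal transliteration: accumulate ret over enumerate(m); branches in source order
def common_cases (m : String) : String :=
  String.ofList ((PySem.List.enumerate m.toList).foldl (fun ret (p : Int × Char) =>
    let c := p.2
    if c = ' ' ∨ c = '-' ∨ c = '"' ∨ c ∈ [' ', '\t', '\n', '-', '%'] then ret ++ []
    else if c = '(' ∨ c = ')' then ret ++ []
    else if c = ';' then ret ++ ['.']
    else ret ++ [c]) [])

-- ===== PORT B =====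
-- the (sep, rep) stage table of Source B
def pvStages_common_cases : List (List Char × List Char) :=
  [([' '], []), (['\t'], []), (['\n'], []), (['-'], []), (['%'], []),
   (['"'], []), (['('], []), ([')'], []), ([';'], ['.'])]

-- literal transliteration of Source B: fold the stages, each stage is rep.join(m.split(sep))
def common_cases_alt (m : String) : String :=
  String.ofList (pvStages_common_cases.foldl
    (fun s p => PySem.Chars.join p.2 (PySem.Chars.splitOn s p.1)) m.toList)

-- ===== PRECONDITION & SPEC =====
def Spec_common_cases (m : String) (out : String) : Prop := out = common_cases_alt m
instance (m : String) (out : String) : Decidable (Spec_common_cases m out) := by unfold Spec_common_cases; infer_instance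

-- ===== CLAIM (what is proved, stated in full; the proofs are below) =====
def Claim_equal_common_cases : Prop := ∀ (m : String), Dom_common_cases m → Spec_common_cases m (common_cases m)

-- ===== LEMMAS AND PROOFS =====

-- A's per-branch output, as a table (used only in the proofs)
def pvTable (c : Char) : Option Char :=
  if c = ';' then some '.'
  else if c ∈ [' ', '\t', '\n', '-', '%', '"', '(', ')'] then none
  else some c

-- reference single-character splitter (matches Chars.splitOn.go for a one-char sep)
def pvSplitAux (c : Char) (pre : List Char) : List Char → List (List Char)
  | [] => [pre]
  | x :: rest => if x = c then pre :: pvSplitAux c [] rest else pvSplitAux c (pre ++ [x]) rest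

theorem pvSplitAux_ne_nil (c : Char) (pre l : List Char) : pvSplitAux c pre l ≠ [] := by
  induction l generalizing pre with
  | nil => simp [pvSplitAux]
  | cons x rest ih =>
    simp only [pvSplitAux]
    split_ifs
    · simp
    · exact ih _

theorem pv_go_eq (c : Char) : ∀ (fuel : Nat) (l cur : List Char) (acc : List (List Char)),
    l.length ≤ fuel →
    PySem.Chars.splitOn.go [c] fuel l cur acc = acc.reverse ++ pvSplitAux c cur.reverse l := by
  intro fuel
  induction fuel with
  | zero =>
    intro l cur acc h
    have : l = [] := List.eq_nil_of_length_eq_zero (Nat.le_zero.mp h)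
    subst this
    simp [PySem.Chars.splitOn.go, pvSplitAux]
  | succ n ih =>
    intro l cur acc h
    cases l with
    | nil => simp [PySem.Chars.splitOn.go, pvSplitAux]
    | cons x rest =>
      simp only [PySem.Chars.splitOn.go]
      by_cases hx : x = c
      · subst hx
        have hpre : List.isPrefixOf [x] (x :: rest) = true := by
          simp [List.isPrefixOf]
        simp only [hpre, if_pos, List.length_cons, List.length_nil, List.drop_succ_cons,
          List.drop_zero]
        rw [ih rest [] (cur.reverse :: acc) (by simpa using Nat.le_of_succ_le_succ h)]
        simp [pvSplitAux]
      · have hpre : List.isPrefixOf [c] (x :: rest) = false := by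
          simp [List.isPrefixOf]
          exact fun hh => absurd hh.symm hx
        simp only [hpre, Bool.false_eq_true, if_false]
        rw [ih rest (x :: cur) acc (by simpa using Nat.le_of_succ_le_succ h)]
        simp [pvSplitAux, hx]

theorem pv_splitOn_single (c : Char) (l : List Char) :
    PySem.Chars.splitOn l [c] = pvSplitAux c [] l := by
  unfold PySem.Chars.splitOn
  rw [pv_go_eq c (l.length + 1) l [] [] (Nat.le_succ _)]
  simp

theorem pv_join_splitAux (s : List Char) (c : Char) :
    ∀ (l pre : List Char),
      PySem.Chars.join s (pvSplitAux c pre l)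
        = pre ++ l.flatMap (fun x => if x = c then s else [x]) := by
  intro l
  induction l with
  | nil => intro pre; simp [pvSplitAux, PySem.Chars.join_singleton]
  | cons x rest ih =>
    intro pre
    simp only [pvSplitAux]
    by_cases hx : x = c
    · subst hx
      simp only [if_true]
      obtain ⟨h, t, ht⟩ : ∃ h t, pvSplitAux x [] rest = h :: t := by
        cases hh : pvSplitAux x [] rest with
        | nil => exact absurd hh (pvSplitAux_ne_nil x [] rest)
        | cons a b => exact ⟨a, b, rfl⟩
      have ihr := ih ([] : List Char)
      rw [ht] at ihr
      rw [ht]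
      rw [PySem.Chars.join_cons_cons, ihr]
      simp [List.flatMap_cons]
    · simp only [if_neg hx]
      rw [ih (pre ++ [x])]
      simp [List.flatMap_cons, hx]

-- each Source B stage is one flatMap over the characters
theorem pv_stage_eq (s : List Char) (c : Char) (l : List Char) :
    PySem.Chars.join s (PySem.Chars.splitOn l [c])
      = l.flatMap (fun x => if x = c then s else [x]) := by
  rw [pv_splitOn_single, pv_join_splitAux]
  simp

-- the nine composed stages act per character exactly as A's branch table
theorem pv_all_stages (l : List Char) :
    pvStages_common_cases.foldl
      (fun s p => PySem.Chars.join p.2 (PySem.Chars.splitOn s p.1)) l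
    = l.filterMap pvTable := by
  simp only [pvStages_common_cases, List.foldl_cons, List.foldl_nil, pv_stage_eq]
  induction l with
  | nil => simp
  | cons x rest ih =>
    simp only [List.flatMap_cons, List.flatMap_append, List.filterMap_cons] at *
    rw [ih]
    unfold pvTable
    by_cases h1 : x = ' ' <;> by_cases h2 : x = '\t' <;> by_cases h3 : x = '\n' <;>
      by_cases h4 : x = '-' <;> by_cases h5 : x = '%' <;> by_cases h6 : x = '"' <;>
      by_cases h7 : x = '(' <;> by_cases h8 : x = ')' <;> by_cases h9 : x = ';' <;>
      simp_all

-- per character, A's branch output is exactly the table entry's toList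
theorem pv_step_acc (acc : List Char) (c : Char) :
    (if c = ' ' ∨ c = '-' ∨ c = '"' ∨ c ∈ [' ', '\t', '\n', '-', '%'] then acc ++ ([] : List Char)
     else if c = '(' ∨ c = ')' then acc ++ []
     else if c = ';' then acc ++ ['.']
     else acc ++ [c]) = acc ++ (pvTable c).toList := by
  unfold pvTable
  split_ifs <;> simp_all

theorem pv_fold_eq (l : List Char) (acc : List Char) (n : Int) :
    ((PySem.List.enumerate l n).foldl (fun ret (p : Int × Char) =>
      let c := p.2
      if c = ' ' ∨ c = '-' ∨ c = '"' ∨ c ∈ [' ', '\t', '\n', '-', '%'] then ret ++ []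
      else if c = '(' ∨ c = ')' then ret ++ []
      else if c = ';' then ret ++ ['.']
      else ret ++ [c]) acc) = acc ++ l.filterMap pvTable := by
  induction l generalizing acc n with
  | nil => simp [PySem.List.enumerate_nil]
  | cons c t ih =>
    simp only [PySem.List.enumerate_cons, List.foldl_cons, List.filterMap_cons]
    rw [ih, pv_step_acc acc c]
    cases pvTable c <;> simp

-- ===== VERDICT (by name: the statement is the Claim_ definition above) =====
theorem common_cases_spec : Claim_equal_common_cases := by
  intro m _
  unfold Spec_common_cases common_cases common_cases_alt
  rw [pv_fold_eq m.toList [] 0, pv_all_stages m.toList]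
  simp
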